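-- pv_equiv track=rewrite | github.com/bewakes/algorithms-and-data-structures | algorithms/convex_hull.py | get_new_hull
-- ===== SOURCE A (Python) =====
-- def direction_from_line(point, line):
--     """
--     @point: given point
--     @line: two points, direction sensitive
--     """
--     # Direction given by y - y1 - (x-x1) * slope: equivalent to (ax + by + c)
--     p1 = line[0]
--     p2 = line[1]
--     x1, y1, x2, y2, x, y = [*p1, *p2, *point]
--     return (y-y1)*(x2-x1) - (x-x1)*(y2-y1)
--
-- def get_new_hull(hull, new_point):
--     # recent directions
--     prev = None
--     curr = None
--     lines = list(zip(hull, hull[1:]+[hull[0]]))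
--     for i, (p1, p2) in enumerate(lines):
--         dir = direction_from_line(new_point, [p1, p2])
--         if curr is None:
--             curr = dir
--         else:
--             prev = curr
--             curr = dir
--             # NOTE: outside means direction -ve inside means direction +ve
--             if prev >= 0 and curr < 0:  # Case outside, inside
--                 # Insert new point after current point
--                 return hull[:i+1] + [new_point] + hull[i+1:]
--             elif prev <= 0 and curr <= 0:  # Case outside, outside
--                 # Replace the current point with new point
--                 return hull[:i] + [new_point] + hull[i+1:]
--     return hull
-- ===== SOURCE B (Python) =====
-- def direction_from_line(point, line):
--     p1 = line[0]
--     p2 = line[1]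
--     x1, y1, x2, y2, x, y = [*p1, *p2, *point]
--     return (y-y1)*(x2-x1) - (x-x1)*(y2-y1)
--
-- def get_new_hull(hull, new_point):
--     # Two independent searches instead of one fused scan: find the first index
--     # where the "insert" condition holds and, separately, the first index where
--     # the "replace" condition holds; whichever comes first decides the action
--     # (insert wins a tie, matching the task's branch priority).
--     n = len(hull)
--     dirs = [direction_from_line(new_point, [p, q])
--             for p, q in zip(hull, hull[1:] + [hull[0]])]
--     pairs = list(zip(dirs, dirs[1:]))
--     ins = next((i for i, (a, b) in enumerate(pairs, 1) if a >= 0 and b < 0), n)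
--     rep = next((i for i, (a, b) in enumerate(pairs, 1) if a <= 0 and b <= 0), n)
--     if ins == n and rep == n:
--         return hull
--     if ins <= rep:
--         return hull[:ins+1] + [new_point] + hull[ins+1:]
--     return hull[:rep] + [new_point] + hull[rep+1:]
-- ===== Notes on version B (the rewrite author's own statement) =====
-- stated objective: alternative
-- what changed: B replaces A's fused early-exit scan carrying rolling Optional prev/curr state by two independent first-index searches (one per condition) over the precomputed direction-pair table, then decides insert vs replace by comparing the two indices (insert wins ties).
import Mathlib
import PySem

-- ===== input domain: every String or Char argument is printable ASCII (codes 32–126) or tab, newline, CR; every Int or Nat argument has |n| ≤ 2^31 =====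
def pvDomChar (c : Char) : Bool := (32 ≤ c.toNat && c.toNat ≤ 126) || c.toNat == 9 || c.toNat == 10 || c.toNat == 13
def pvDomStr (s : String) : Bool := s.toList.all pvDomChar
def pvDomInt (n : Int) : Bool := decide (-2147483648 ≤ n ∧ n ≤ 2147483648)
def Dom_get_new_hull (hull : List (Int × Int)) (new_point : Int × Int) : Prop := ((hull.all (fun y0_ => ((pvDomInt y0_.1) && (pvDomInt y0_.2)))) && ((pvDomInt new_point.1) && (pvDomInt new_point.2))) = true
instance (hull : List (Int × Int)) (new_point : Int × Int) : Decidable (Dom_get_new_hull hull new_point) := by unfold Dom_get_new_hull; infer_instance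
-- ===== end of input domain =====

-- B replaces A's fused early-exit scan with rolling Optional state by two
-- independent first-index searches (insert / replace) compared afterwards
-- (objective: alternative decomposition, same cost).

-- ===== PORT A =====
-- direction_from_line(point, [p1, p2])
def directionFromLine (point p1 p2 : Int × Int) : Int :=
  (point.2 - p1.2) * (p2.1 - p1.1) - (point.1 - p1.1) * (p2.2 - p1.2)

-- A's for-loop over enumerate(lines) with the rolling prev/curr state; slices
-- hull[:i+1], hull[i+1:], hull[:i] have nonnegative in-range bounds, for which
-- List.take / List.drop are exact.
def aLoop (hull : List (Int × Int)) (new_point : Int × Int) :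
    List ((Int × Int) × (Int × Int)) → Nat → Option Int → List (Int × Int)
  | [], _, _ => hull
  | (p1, p2) :: rest, i, curr =>
    let dir := directionFromLine new_point p1 p2
    match curr with
    | none => aLoop hull new_point rest (i + 1) (some dir)
    | some prev =>
      if prev ≥ 0 ∧ dir < 0 then
        hull.take (i + 1) ++ [new_point] ++ hull.drop (i + 1)
      else if prev ≤ 0 ∧ dir ≤ 0 then
        hull.take i ++ [new_point] ++ hull.drop (i + 1)
      else aLoop hull new_point rest (i + 1) (some dir)

def get_new_hull (hull : List (Int × Int)) (new_point : Int × Int) : List (Int × Int) :=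
  match hull with
  | [] => []  -- Python raises IndexError on hull[0]; excluded by Pre_
  | h :: _ =>
    let lines := List.zip hull (hull.drop 1 ++ [h])
    aLoop hull new_point lines 0 none

-- ===== PORT B =====
-- next((i for i,(a,b) in enumerate(pairs,1) if p a b), n)
def findPair (p : Int → Int → Bool) (n : Nat) : List (Int × Int) → Nat → Nat
  | [], _ => n
  | (a, b) :: rest, i => if p a b then i else findPair p n rest (i + 1)

def get_new_hull_alt (hull : List (Int × Int)) (new_point : Int × Int) : List (Int × Int) :=
  match hull with
  | [] => []  -- Python raises IndexError on hull[0]; excluded by Pre_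
  | h :: _ =>
    let n := hull.length
    let dirs := (List.zip hull (hull.drop 1 ++ [h])).map
      (fun pq => directionFromLine new_point pq.1 pq.2)
    let pairs := List.zip dirs (dirs.drop 1)
    let ins := findPair (fun a b => a ≥ 0 && b < 0) n pairs 1
    let rep := findPair (fun a b => a ≤ 0 && b ≤ 0) n pairs 1
    if ins = n ∧ rep = n then hull
    else if ins ≤ rep then hull.take (ins + 1) ++ [new_point] ++ hull.drop (ins + 1)
    else hull.take rep ++ [new_point] ++ hull.drop (rep + 1)

-- ===== PRECONDITION & SPEC =====
-- Pre_ excludes exactly the empty hull, on which Python A raises IndexError (hull[0]).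
def Pre_get_new_hull (hull : List (Int × Int)) (new_point : Int × Int) : Prop := hull ≠ []
instance (hull : List (Int × Int)) (new_point : Int × Int) : Decidable (Pre_get_new_hull hull new_point) := by unfold Pre_get_new_hull; infer_instance
def pvWitness_get_new_hull : (List (Int × Int)) × (Int × Int) := ([(0, 0), (2, 0), (1, 2)], (3, 3))

def Spec_get_new_hull (hull : List (Int × Int)) (new_point : Int × Int) (out : List (Int × Int)) : Prop := out = get_new_hull_alt hull new_point
instance (hull : List (Int × Int)) (new_point : Int × Int) (out : List (Int × Int)) : Decidable (Spec_get_new_hull hull new_point out) := by unfold Spec_get_new_hull; infer_instance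

-- ===== CLAIM (what is proved, stated in full; the proofs are below) =====
def Claim_equal_get_new_hull : Prop := ∀ (hull : List (Int × Int)) (new_point : Int × Int), Dom_get_new_hull hull new_point → Pre_get_new_hull hull new_point → Spec_get_new_hull hull new_point (get_new_hull hull new_point)

-- ===== LEMMAS AND PROOFS =====

-- Proof-only bridge: A's fused scan viewed as a scan over adjacent direction pairs.
def pairScan (hull : List (Int × Int)) (new_point : Int × Int) :
    List (Int × Int) → Nat → List (Int × Int)
  | [], _ => hull
  | (prev, curr) :: rest, i =>
    if prev ≥ 0 ∧ curr < 0 then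
      hull.take (i + 1) ++ [new_point] ++ hull.drop (i + 1)
    else if prev ≤ 0 ∧ curr ≤ 0 then
      hull.take i ++ [new_point] ++ hull.drop (i + 1)
    else pairScan hull new_point rest (i + 1)

theorem aLoop_eq_pairScan (hull : List (Int × Int)) (new_point : Int × Int) :
    ∀ (rest : List ((Int × Int) × (Int × Int))) (i : Nat) (c : Int),
      aLoop hull new_point rest i (some c) =
        pairScan hull new_point
          (List.zip (c :: rest.map (fun pq => directionFromLine new_point pq.1 pq.2))
                    (rest.map (fun pq => directionFromLine new_point pq.1 pq.2))) i := by
  intro rest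
  induction rest with
  | nil => intro i c; simp [aLoop, pairScan]
  | cons hd tl ih =>
    intro i c
    obtain ⟨p1, p2⟩ := hd
    simp only [aLoop, List.map_cons, List.zip_cons_cons, pairScan]
    split_ifs with h1 h2
    · rfl
    · rfl
    · exact ih (i + 1) (directionFromLine new_point p1 p2)

theorem findPair_ge_aux (p : Int → Int → Bool) (n : Nat) :
    ∀ (L : List (Int × Int)) (i : Nat), findPair p n L i = n ∨ i ≤ findPair p n L i := by
  intro L
  induction L with
  | nil => intro i; exact Or.inl rfl
  | cons hd tl ih =>
    intro i
    obtain ⟨a, b⟩ := hd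
    simp only [findPair]
    split_ifs
    · exact Or.inr (le_refl i)
    · rcases ih (i + 1) with h | h
      · exact Or.inl h
      · exact Or.inr (by omega)

theorem pairScan_eq_search (hull : List (Int × Int)) (new_point : Int × Int) (n : Nat) :
    ∀ (L : List (Int × Int)) (i : Nat), i + L.length ≤ n →
      pairScan hull new_point L i =
        (let ins := findPair (fun a b => a ≥ 0 && b < 0) n L i
         let rep := findPair (fun a b => a ≤ 0 && b ≤ 0) n L i
         if ins = n ∧ rep = n then hull
         else if ins ≤ rep then hull.take (ins + 1) ++ [new_point] ++ hull.drop (ins + 1)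
         else hull.take rep ++ [new_point] ++ hull.drop (rep + 1)) := by
  intro L
  induction L with
  | nil => intro i _; simp [pairScan, findPair]
  | cons hd tl ih =>
    intro i hle
    obtain ⟨a, b⟩ := hd
    have hin : i < n := by simp only [List.length_cons] at hle; omega
    simp only [pairScan, findPair]
    by_cases h1 : a ≥ 0 ∧ b < 0
    · have hp1 : (decide (a ≥ 0) && decide (b < 0)) = true := by simp [h1.1, h1.2]
      rw [if_pos h1, if_pos hp1]
      have hrep : i ≤ (if (decide (a ≤ 0) && decide (b ≤ 0)) = true then i
          else findPair (fun x y => decide (x ≤ 0) && decide (y ≤ 0)) n tl (i + 1)) := by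
        split_ifs
        · exact le_refl i
        · rcases findPair_ge_aux (fun x y => decide (x ≤ 0) && decide (y ≤ 0)) n tl (i + 1)
            with he | he <;> omega
      rw [if_neg (fun hc => absurd hc.1 (by omega)), if_pos hrep]
    · have hp1 : (decide (a ≥ 0) && decide (b < 0)) = false := by
        by_cases ha : a ≥ 0
        · have hb : ¬ b < 0 := fun hb => h1 ⟨ha, hb⟩
          simp [ha, hb]
        · simp [ha]
      by_cases h2 : a ≤ 0 ∧ b ≤ 0
      · have hp2 : (decide (a ≤ 0) && decide (b ≤ 0)) = true := by simp [h2.1, h2.2]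
        rw [if_neg h1, if_pos h2]
        simp only [hp1, hp2, Bool.false_eq_true, if_false, if_true]
        have hins : findPair (fun x y => decide (x ≥ 0) && decide (y < 0)) n tl (i + 1) = n ∨
            i + 1 ≤ findPair (fun x y => decide (x ≥ 0) && decide (y < 0)) n tl (i + 1) :=
          findPair_ge_aux _ n tl (i + 1)
        rw [if_neg (fun hc => absurd hc.2 (by omega)), if_neg (by omega)]
      · have hp2 : (decide (a ≤ 0) && decide (b ≤ 0)) = false := by
          by_cases ha : a ≤ 0
          · have hb : ¬ b ≤ 0 := fun hb => h2 ⟨ha, hb⟩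
            simp [ha, hb]
          · simp [ha]
        rw [if_neg h1, if_neg h2]
        simp only [hp1, hp2, Bool.false_eq_true, if_false]
        exact ih (i + 1) (by simp only [List.length_cons] at hle; omega)

-- ===== VERDICT (by name: the statement is the Claim_ definition above) =====
theorem get_new_hull_spec : Claim_equal_get_new_hull := by
  intro hull new_point _ hpre
  unfold Spec_get_new_hull get_new_hull get_new_hull_alt
  match hull with
  | [] => exact absurd rfl hpre
  | h :: t =>
    simp only
    match ht : t with
    | [] =>
      simp [aLoop, findPair]
    | q :: t' =>
      show aLoop (h :: q :: t') new_point
            ((h, q) :: List.zip (q :: t') (t' ++ [h])) 0 none = _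
      rw [show aLoop (h :: q :: t') new_point
            ((h, q) :: List.zip (q :: t') (t' ++ [h])) 0 none =
          aLoop (h :: q :: t') new_point (List.zip (q :: t') (t' ++ [h])) 1
            (some (directionFromLine new_point h q)) from rfl]
      rw [aLoop_eq_pairScan]
      rw [pairScan_eq_search (h :: q :: t') new_point (h :: q :: t').length _ 1
        (by simp [List.length_zip]; omega)]
      rfl
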